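-- pv_equiv track=rewrite | github.com/anhtumai/data-structure-and-algorithms-collection | graph/compute_strongly_connected_components.py | get_dfs_stack
-- ===== SOURCE A (Python) =====
-- from typing import Generator
--
-- Node = any
--
-- Graph = dict[Node, list[Node]]
--
-- Stack = list[Node]
--
-- def genrate_all_nodes(graph: Graph) -> Generator[int, None, None]:
--     """
--     Return a generator for all nodes in the graph
--     """
--     mentioned_nodes = set()
--     for node in graph.keys():
--         if node not in mentioned_nodes:
--             yield node
--             mentioned_nodes.add(node)
--             for neighbour in graph[node]:
--                 if neighbour not in mentioned_nodes:
--                     yield neighbour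
--                     mentioned_nodes.add(neighbour)
--
-- def get_dfs_stack(graph: Graph) -> Stack:
--     """
--     Perform DFS traversal in an input graph
--     Return a stack, representing the order of the path
--     (the starting node will be returned when we pop the stack for the first time)
--     """
--     explored = set()
--     stack = []
--
--     def dfs_util(node: Node) -> None:
--         explored.add(node)
--         if node in graph:
--             for neighbour in graph[node]:
--                 if neighbour not in explored:
--                     dfs_util(neighbour)
--         stack.append(node)
--
--     for node in genrate_all_nodes(graph):
--         if node not in explored:
--             dfs_util(node)
--
--     return stack
-- ===== SOURCE B (Python) =====
-- def get_dfs_stack(graph):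
--     """
--     Iterative DFS driven directly by the dict's keys: an explicit stack of
--     (node, neighbour-iterator) frames replaces both the recursion and the
--     node generator; produces the same post-order finishing stack.
--     """
--     explored = set()
--     order = []
--     for start in graph:
--         if start in explored:
--             continue
--         explored.add(start)
--         frames = [(start, iter(graph.get(start, ())))]
--         while frames:
--             node, neighbours = frames[-1]
--             for neighbour in neighbours:
--                 if neighbour not in explored:
--                     explored.add(neighbour)
--                     frames.append((neighbour, iter(graph.get(neighbour, ()))))
--                     break
--             else:
--                 frames.pop()
--                 order.append(node)
--     return order
-- ===== Notes on version B (the rewrite author's own statement) =====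
-- stated objective: simpler
-- what changed: B drops the genrate_all_nodes generator entirely (starting DFS from the dict keys alone provably yields the same finishing stack, since every generated neighbour is already explored when the loop reaches it) and replaces the recursive dfs_util with an explicit stack of (node, neighbour-iterator) frames.
import Mathlib
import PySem

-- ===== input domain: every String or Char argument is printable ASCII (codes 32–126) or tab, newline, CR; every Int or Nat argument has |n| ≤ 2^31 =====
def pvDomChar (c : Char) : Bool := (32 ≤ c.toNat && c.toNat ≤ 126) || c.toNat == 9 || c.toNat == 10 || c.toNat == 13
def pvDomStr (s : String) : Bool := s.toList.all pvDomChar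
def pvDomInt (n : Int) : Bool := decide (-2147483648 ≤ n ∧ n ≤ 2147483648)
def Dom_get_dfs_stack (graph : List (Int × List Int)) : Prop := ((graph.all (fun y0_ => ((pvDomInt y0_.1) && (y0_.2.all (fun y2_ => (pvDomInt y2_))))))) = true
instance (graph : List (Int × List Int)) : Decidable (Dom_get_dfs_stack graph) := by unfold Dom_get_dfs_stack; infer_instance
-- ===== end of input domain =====

-- B drops the node generator entirely (starting DFS from the dict keys alone provably yields the
-- same finishing stack) and replaces the recursive dfs_util by an explicit stack machine of
-- (node, remaining-neighbours) frames.  Both ports carry a fuel guard (one unit per node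
-- entered); the equivalence holds for every fuel value and the supplied fuel always suffices.

-- ===== PORT A =====

-- graph.get(node, []) / 'if node in graph: graph[node]' — first-match dict lookup
def pvNbrs (graph : List (Int × List Int)) (node : Int) : List Int :=
  ((PySem.Dict.mk graph).get? node).getD []

-- genrate_all_nodes' inner loop: yield each not-yet-mentioned neighbour, updating mentioned
def pvGenNbrs : List Int → PySem.Set Int → PySem.Set Int × List Int
  | [], m => (m, [])
  | nb :: rest, m =>
    if m.contains nb then pvGenNbrs rest m
    else
      let p := pvGenNbrs rest (m.add nb)
      (p.1, nb :: p.2)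

-- genrate_all_nodes' outer loop over graph.keys(), yields materialised into a list (the
-- generator reads only graph, which is never modified, so materialising it is exact)
def pvGenKeys (graph : List (Int × List Int)) : List Int → PySem.Set Int → List Int
  | [], _ => []
  | k :: ks, m =>
    if m.contains k then pvGenKeys graph ks m
    else
      let p := pvGenNbrs (pvNbrs graph k) (m.add k)
      k :: (p.2 ++ pvGenKeys graph ks p.1)

def pvGenAll (graph : List (Int × List Int)) : List Int :=
  pvGenKeys graph (PySem.Dict.mk graph).keys PySem.Set.empty

-- dfs_util's neighbour loop: recurse into each unexplored neighbour (the entered node is added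
-- to explored and, after its loop, appended to the output by the caller's inlined step)
def pvDfsA (graph : List (Int × List Int)) :
    Nat → List Int → PySem.Set Int → List Int → Option (Nat × PySem.Set Int × List Int)
  | f, [], ex, out => some (f, ex, out)
  | f, nb :: rest, ex, out =>
    if ex.contains nb then pvDfsA graph f rest ex out
    else
      match f with
      | 0 => none
      | f + 1 =>
        match pvDfsA graph f (pvNbrs graph nb) (ex.add nb) out with
        | none => none
        | some (f', ex', out') => pvDfsA graph (min f' f) rest ex' (out' ++ [nb])
termination_by f l => (f, l.length)
decreasing_by all_goals
  first
  | exact Prod.Lex.left _ _ (by omega)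
  | exact Prod.Lex.right _ (by simp)

-- 'for node in genrate_all_nodes(graph): if node not in explored: dfs_util(node)'
def pvLoopA (graph : List (Int × List Int)) :
    List Int → Nat → PySem.Set Int → List Int → Option (PySem.Set Int × List Int)
  | [], _, ex, out => some (ex, out)
  | n :: ns, f, ex, out =>
    if ex.contains n then pvLoopA graph ns f ex out
    else
      match f with
      | 0 => none
      | f + 1 =>
        match pvDfsA graph f (pvNbrs graph n) (ex.add n) out with
        | none => none
        | some (f', ex', out') => pvLoopA graph ns (min f' f) ex' (out' ++ [n])

-- fuel: one unit per node entered; entered nodes are distinct members of the graph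
def pvFuel (graph : List (Int × List Int)) : Nat :=
  graph.foldl (fun a p => a + 1 + p.2.length) 1

def get_dfs_stack (graph : List (Int × List Int)) : List Int :=
  match pvLoopA graph (pvGenAll graph) (pvFuel graph) PySem.Set.empty [] with
  | some (_, out) => out
  | none => []

-- ===== PORT B =====

-- the while loop: frames of (node, remaining neighbours), head = top of the frame stack;
-- advance past explored neighbours, push the first unexplored one, pop and emit when exhausted
def pvRunB (graph : List (Int × List Int)) :
    Nat → List (Int × List Int) → PySem.Set Int → List Int →
    Option (Nat × PySem.Set Int × List Int)
  | f, [], ex, out => some (f, ex, out)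
  | f, (node, []) :: fs, ex, out => pvRunB graph f fs ex (out ++ [node])
  | f, (node, nb :: rest) :: fs, ex, out =>
    if ex.contains nb then pvRunB graph f ((node, rest) :: fs) ex out
    else
      match f with
      | 0 => none
      | f + 1 => pvRunB graph f ((nb, pvNbrs graph nb) :: (node, rest) :: fs) (ex.add nb) out
termination_by f fs => (f, (fs.map (fun p => 1 + p.2.length)).sum)
decreasing_by all_goals
  first
  | exact Prod.Lex.left _ _ (by omega)
  | exact Prod.Lex.right _ (by simp)

-- 'for start in graph: if unexplored, mark it, run the machine from one frame'
def pvLoopB (graph : List (Int × List Int)) :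
    List Int → Nat → PySem.Set Int → List Int → Option (PySem.Set Int × List Int)
  | [], _, ex, out => some (ex, out)
  | start :: ks, f, ex, out =>
    if ex.contains start then pvLoopB graph ks f ex out
    else
      match f with
      | 0 => none
      | f + 1 =>
        match pvRunB graph f [(start, pvNbrs graph start)] (ex.add start) out with
        | none => none
        | some (f', ex', out') => pvLoopB graph ks f' ex' out'

-- same fuel budget as A's port, written closed-form
def pvFuelB (graph : List (Int × List Int)) : Nat :=
  1 + graph.length + (graph.map (fun p => p.2.length)).sum

def get_dfs_stack_alt (graph : List (Int × List Int)) : List Int :=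
  match pvLoopB graph (PySem.Dict.mk graph).keys (pvFuelB graph) PySem.Set.empty [] with
  | some (_, out) => out
  | none => []

-- ===== PRECONDITION & SPEC =====
def Spec_get_dfs_stack (graph : List (Int × List Int)) (out : List Int) : Prop := out = get_dfs_stack_alt graph
instance (graph : List (Int × List Int)) (out : List Int) : Decidable (Spec_get_dfs_stack graph out) := by unfold Spec_get_dfs_stack; infer_instance

-- ===== CLAIM (what is proved, stated in full; the proofs are below) =====
def Claim_equal_get_dfs_stack : Prop := ∀ (graph : List (Int × List Int)), Dom_get_dfs_stack graph → Spec_get_dfs_stack graph (get_dfs_stack graph)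

-- ===== LEMMAS AND PROOFS =====

-- the two fuel expressions agree
theorem pvFoldl_fuel : ∀ (g : List (Int × List Int)) (c : Nat),
    g.foldl (fun a p => a + 1 + p.2.length) c = c + g.length + (g.map (fun p => p.2.length)).sum := by
  intro g
  induction g with
  | nil => intro c; simp
  | cons p g ih =>
    intro c
    simp only [List.foldl_cons, List.length_cons, List.map_cons, List.sum_cons, ih]
    omega

theorem pvFuelB_eq (graph : List (Int × List Int)) : pvFuelB graph = pvFuel graph := by
  unfold pvFuel pvFuelB
  rw [pvFoldl_fuel]

-- leftover fuel never exceeds the fuel supplied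
theorem pvDfsA_fuel_le (graph : List (Int × List Int)) :
    ∀ f l ex out f' ex' out',
      pvDfsA graph f l ex out = some (f', ex', out') → f' ≤ f := by
  intro f l ex out
  induction f, l, ex, out using pvDfsA.induct graph with
  | case1 f ex out =>
    intro f' ex' out' h
    simp only [pvDfsA, Option.some.injEq, Prod.mk.injEq] at h
    omega
  | case2 f nb rest ex out hc ih =>
    intro f' ex' out' h
    rcases f with _ | f <;> simp only [pvDfsA, hc, if_true] at h <;> exact ih _ _ _ h
  | case3 nb rest ex out hc =>
    intro f' ex' out' h
    simp only [pvDfsA, hc] at h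
    cases h
  | case4 nb rest ex out hc f hinner ih1 =>
    intro f' ex' out' h
    simp only [pvDfsA, hc, hinner] at h
    cases h
  | case5 nb rest ex out hc f f1 ex1 out1 hinner ih1 ih2 =>
    intro f' ex' out' h
    simp only [pvDfsA, hc, hinner] at h
    have := ih2 _ _ _ h
    omega

-- dfs postcondition: the explored set only grows, every listed neighbour ends explored, and
-- every NEWLY explored node has all its neighbours explored ("closed")
theorem pvDfsA_post (graph : List (Int × List Int)) :
    ∀ f l ex out f' ex' out',
      pvDfsA graph f l ex out = some (f', ex', out') →
      (∀ x, x ∈ ex → x ∈ ex') ∧ (∀ x, x ∈ l → x ∈ ex') ∧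
      (∀ x, x ∉ ex → x ∈ ex' → ∀ y ∈ pvNbrs graph x, y ∈ ex') := by
  intro f l ex out
  induction f, l, ex, out using pvDfsA.induct graph with
  | case1 f ex out =>
    intro f' ex' out' h
    simp only [pvDfsA, Option.some.injEq, Prod.mk.injEq] at h
    obtain ⟨-, hex, -⟩ := h
    subst hex
    exact ⟨fun x hx => hx, fun x hx => absurd hx (List.not_mem_nil), fun x hx hx' => absurd hx' hx⟩
  | case2 f nb rest ex out hc ih =>
    intro f' ex' out' h
    have hnb : nb ∈ ex := (PySem.Set.contains_iff _ _).mp hc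
    rcases f with _ | f <;> simp only [pvDfsA, hc, if_true] at h <;>
      (obtain ⟨h1, h2, h3⟩ := ih _ _ _ h;
       exact ⟨h1, fun x hx => by rcases List.mem_cons.mp hx with rfl | hx; exacts [h1 _ hnb, h2 _ hx], h3⟩)
  | case3 nb rest ex out hc =>
    intro f' ex' out' h
    simp only [pvDfsA, hc] at h
    cases h
  | case4 nb rest ex out hc f hinner ih1 =>
    intro f' ex' out' h
    simp only [pvDfsA, hc, hinner] at h
    cases h
  | case5 nb rest ex out hc f f1 ex1 out1 hinner ih1 ih2 =>
    intro f' ex' out' h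
    simp only [pvDfsA, hc, hinner] at h
    obtain ⟨i1, i2, i3⟩ := ih1 _ _ _ hinner
    obtain ⟨j1, j2, j3⟩ := ih2 _ _ _ h
    have hnb1 : nb ∈ ex1 := i1 _ ((PySem.Set.mem_add _ _ _).mpr (Or.inr rfl))
    refine ⟨fun x hx => j1 _ (i1 _ ((PySem.Set.mem_add _ _ _).mpr (Or.inl hx))), ?_, ?_⟩
    · intro x hx
      rcases List.mem_cons.mp hx with rfl | hx
      · exact j1 _ hnb1
      · exact j2 _ hx
    · intro x hx hx' y hy
      by_cases h1 : x ∈ ex1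
      · by_cases hxnb : x = nb
        · subst hxnb; exact j1 _ (i2 _ hy)
        · have : x ∉ PySem.Set.add ex nb := fun hmem => by
            rcases (PySem.Set.mem_add _ _ _).mp hmem with hmem | hmem
            exacts [hx hmem, hxnb hmem]
          exact j1 _ (i3 x this h1 y hy)
      · exact j3 x h1 hx' y hy

-- already-explored prefixes of the worklist are skipped without changing the state
theorem pvLoopA_skip (graph : List (Int × List Int)) :
    ∀ (ms ns : List Int) f ex out, (∀ x ∈ ms, x ∈ ex) →
      pvLoopA graph (ms ++ ns) f ex out = pvLoopA graph ns f ex out := by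
  intro ms
  induction ms with
  | nil => intro ns f ex out _; rfl
  | cons m ms ih =>
    intro ns f ex out h
    have hc : ex.contains m = true := (PySem.Set.contains_iff _ _).mpr (h m (List.mem_cons_self))
    simp only [List.cons_append, pvLoopA, hc, if_true]
    exact ih ns f ex out (fun x hx => h x (List.mem_cons_of_mem _ hx))

-- the generator's inner loop yields only elements of its input list, and its mentioned set
-- only acquires elements of that list
theorem pvGenNbrs_sub : ∀ (l : List Int) (m : PySem.Set Int),
    (∀ x ∈ (pvGenNbrs l m).2, x ∈ l) ∧ (∀ x ∈ (pvGenNbrs l m).1, x ∈ m ∨ x ∈ l) := by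
  intro l
  induction l with
  | nil => intro m; exact ⟨fun x hx => absurd hx (List.not_mem_nil), fun x hx => Or.inl hx⟩
  | cons nb rest ih =>
    intro m
    by_cases hc : m.contains nb = true
    · simp only [pvGenNbrs, hc, if_true]
      obtain ⟨h1, h2⟩ := ih m
      exact ⟨fun x hx => List.mem_cons_of_mem _ (h1 x hx),
             fun x hx => (h2 x hx).imp id (List.mem_cons_of_mem _)⟩
    · simp only [pvGenNbrs, hc, Bool.false_eq_true, if_false]
      obtain ⟨h1, h2⟩ := ih (m.add nb)
      constructor
      · intro x hx
        rcases List.mem_cons.mp hx with rfl | hx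
        · exact List.mem_cons_self
        · exact List.mem_cons_of_mem _ (h1 x hx)
      · intro x hx
        rcases h2 x hx with hx | hx
        · rcases (PySem.Set.mem_add _ _ _).mp hx with hx | rfl
          · exact Or.inl hx
          · exact Or.inr List.mem_cons_self
        · exact Or.inr (List.mem_cons_of_mem _ hx)

-- MAIN: when the explored set is closed under neighbours and contains every mentioned node,
-- driving the DFS loop by the generator's output equals driving it by the keys alone —
-- every yielded neighbour is already explored by the time the loop reaches it
theorem pvMain (graph : List (Int × List Int)) :
    ∀ (ks : List Int) (m ex : PySem.Set Int) (f : Nat) (out : List Int),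
      (∀ x ∈ ex, ∀ y ∈ pvNbrs graph x, y ∈ ex) → (∀ x ∈ m, x ∈ ex) →
      pvLoopA graph (pvGenKeys graph ks m) f ex out = pvLoopA graph ks f ex out := by
  intro ks
  induction ks with
  | nil => intro m ex f out _ _; rfl
  | cons k ks ih =>
    intro m ex f out hclosed hm
    by_cases hmk : m.contains k = true
    · have hk : ex.contains k = true :=
        (PySem.Set.contains_iff _ _).mpr (hm _ ((PySem.Set.contains_iff _ _).mp hmk))
      simp only [pvGenKeys, hmk, if_true, pvLoopA, hk]
      exact ih m ex f out hclosed hm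
    · obtain ⟨g1, g2⟩ := pvGenNbrs_sub (pvNbrs graph k) (m.add k)
      by_cases hk : k ∈ ex
      · have hkc : ex.contains k = true := (PySem.Set.contains_iff _ _).mpr hk
        simp only [pvGenKeys, hmk, Bool.false_eq_true, if_false, pvLoopA, hkc, if_true]
        rw [pvLoopA_skip graph _ _ f ex out (fun x hx => hclosed k hk x (g1 x hx))]
        refine ih _ ex f out hclosed ?_
        intro x hx
        rcases g2 x hx with hx | hx
        · rcases (PySem.Set.mem_add _ _ _).mp hx with hx | rfl
          · exact hm x hx
          · exact hk
        · exact hclosed k hk x hx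
      · have hkc : ex.contains k = false := by
          rw [Bool.eq_false_iff]; intro h; exact hk ((PySem.Set.contains_iff _ _).mp h)
        rcases f with _ | f
        · simp only [pvGenKeys, hmk, Bool.false_eq_true, if_false, pvLoopA, hkc]
        · cases hd : pvDfsA graph f (pvNbrs graph k) (ex.add k) out with
          | none =>
            simp only [pvGenKeys, hmk, Bool.false_eq_true, if_false, pvLoopA, hkc, hd]
          | some r =>
            obtain ⟨f1, ex1, out1⟩ := r
            simp only [pvGenKeys, hmk, Bool.false_eq_true, if_false, pvLoopA, hkc, hd]
            obtain ⟨p1, p2, p3⟩ := pvDfsA_post graph _ _ _ _ _ _ _ hd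
            have hex1 : ∀ x ∈ ex, x ∈ ex1 := fun x hx => p1 x ((PySem.Set.mem_add _ _ _).mpr (Or.inl hx))
            have hkin : k ∈ ex1 := p1 k ((PySem.Set.mem_add _ _ _).mpr (Or.inr rfl))
            rw [pvLoopA_skip graph _ _ _ ex1 _ (fun x hx => p2 x (g1 x hx))]
            refine ih _ ex1 _ _ ?_ ?_
            · intro x hx y hy
              by_cases hxex : x ∈ ex
              · exact hex1 y (hclosed x hxex y hy)
              · by_cases hxk : x = k
                · subst hxk; exact p2 y hy
                · have : x ∉ PySem.Set.add ex k := fun hmem => by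
                    rcases (PySem.Set.mem_add _ _ _).mp hmem with hmem | hmem
                    exacts [hxex hmem, hxk hmem]
                  exact p3 x this hx y hy
            · intro x hx
              rcases g2 x hx with hx | hx
              · rcases (PySem.Set.mem_add _ _ _).mp hx with hx | rfl
                · exact hex1 x (hm x hx)
                · exact hkin
              · exact p2 x hx

-- the stack machine run on a frame (node, l) computes exactly dfs_util's neighbour loop on l,
-- then pops, appending node — with identical fuel consumption
theorem pvBridge (graph : List (Int × List Int)) :
    ∀ f l ex out node fs,
      pvRunB graph f ((node, l) :: fs) ex out =
        match pvDfsA graph f l ex out with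
        | none => none
        | some (f', ex', out') => pvRunB graph f' fs ex' (out' ++ [node]) := by
  intro f l ex out
  induction f, l, ex, out using pvDfsA.induct graph with
  | case1 f ex out =>
    intro node fs
    simp only [pvRunB, pvDfsA]
  | case2 f nb rest ex out hc ih =>
    intro node fs
    rcases f with _ | f <;> simp only [pvRunB, pvDfsA, hc, if_true] <;> exact ih node fs
  | case3 nb rest ex out hc =>
    intro node fs
    rw [pvRunB.eq_3, pvDfsA.eq_2, if_neg hc, if_neg hc]
  | case4 nb rest ex out hc f hinner ih1 =>
    intro node fs
    simp only [pvRunB, pvDfsA, hc, hinner]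
    have h1 := ih1 nb ((node, rest) :: fs)
    simp only [hinner] at h1
    exact h1
  | case5 nb rest ex out hc f f1 ex1 out1 hinner ih1 ih2 =>
    intro node fs
    simp only [pvRunB, pvDfsA, hc, hinner]
    have hle : f1 ≤ f := pvDfsA_fuel_le graph _ _ _ _ _ _ _ hinner
    have h1 := ih1 nb ((node, rest) :: fs)
    simp only [hinner] at h1
    rw [h1]
    have h2 := ih2 node fs
    rw [Nat.min_eq_left hle] at h2 ⊢
    exact h2

-- A's outer loop over a worklist equals B's outer loop over the same worklist
theorem pvLoop_eq (graph : List (Int × List Int)) :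
    ∀ ns f ex out, pvLoopA graph ns f ex out = pvLoopB graph ns f ex out := by
  intro ns
  induction ns with
  | nil => intro f ex out; rfl
  | cons n ns ih =>
    intro f ex out
    by_cases hc : ex.contains n = true
    · rcases f with _ | f <;> simp only [pvLoopA, pvLoopB, hc, if_true] <;> exact ih _ _ _
    · rcases f with _ | f
      · simp only [pvLoopA, pvLoopB, hc, Bool.false_eq_true, if_false]
      · simp only [pvLoopA, pvLoopB, hc, Bool.false_eq_true, if_false]
        have hb := pvBridge graph f (pvNbrs graph n) (ex.add n) out n []
        cases hd : pvDfsA graph f (pvNbrs graph n) (ex.add n) out with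
        | none => simp only [hd] at hb ⊢; rw [hb]
        | some r =>
          obtain ⟨f', ex', out'⟩ := r
          simp only [hd] at hb ⊢
          have hle : f' ≤ f := pvDfsA_fuel_le graph _ _ _ _ _ _ _ hd
          rw [hb, pvRunB, Nat.min_eq_left hle]
          exact ih _ _ _

-- ===== VERDICT (by name: the statement is the Claim_ definition above) =====
theorem get_dfs_stack_spec : Claim_equal_get_dfs_stack := by
  intro graph _
  unfold Spec_get_dfs_stack get_dfs_stack get_dfs_stack_alt pvGenAll
  rw [pvFuelB_eq,
      pvMain graph _ PySem.Set.empty PySem.Set.empty _ []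
        (fun x hx => absurd hx (List.not_mem_nil))
        (fun x hx => absurd hx (List.not_mem_nil)),
      pvLoop_eq]
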